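-- pv_equiv track=rewrite | github.com/BU-Spark/CS506-Spring2020-Projects | The Conquistadors (StateSurplusLands)/string_similarity.py | calculate_intersection
-- ===== SOURCE A (Python) =====
-- def calculate_intersection(set1, set2):
--     set1Vals = []
--     intersection = []
--     for i in set1:
--         set1Vals.append(i)
--     for i in set2:
--         if i in set1Vals:
--             if i not in intersection:
--                 intersection.append(i)
--     return len(intersection)
-- ===== SOURCE B (Python) =====
-- def calculate_intersection(set1, set2):
--     a = sorted(set(set1))
--     b = sorted(set(set2))
--     i = j = count = 0
--     while i < len(a) and j < len(b):
--         if a[i] < b[j]: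
--             i += 1
--         elif b[j] < a[i]:
--             j += 1
--         else:
--             count += 1
--             i += 1
--             j += 1
--     return count
-- ===== Notes on version B (the rewrite author's own statement) =====
-- stated objective: faster
-- what changed: Replaces A's nested linear membership scans with sort-then-merge: dedupe and sort both inputs, then count matches in one two-pointer merge scan of the sorted lists.
import Mathlib
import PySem

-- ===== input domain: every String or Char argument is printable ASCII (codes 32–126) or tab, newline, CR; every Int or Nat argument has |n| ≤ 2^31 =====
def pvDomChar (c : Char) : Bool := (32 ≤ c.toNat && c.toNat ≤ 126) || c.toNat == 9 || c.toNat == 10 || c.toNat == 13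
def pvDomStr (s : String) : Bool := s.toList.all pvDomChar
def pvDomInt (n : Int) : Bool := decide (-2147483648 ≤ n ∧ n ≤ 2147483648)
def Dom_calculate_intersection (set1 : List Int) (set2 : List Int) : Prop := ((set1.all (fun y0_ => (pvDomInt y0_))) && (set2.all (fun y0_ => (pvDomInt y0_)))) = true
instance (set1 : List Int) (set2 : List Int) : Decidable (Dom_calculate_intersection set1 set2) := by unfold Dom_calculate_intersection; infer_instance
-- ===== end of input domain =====

-- B replaces A's nested membership scans with sort-then-merge: sort both deduped inputs and count matches in one two-pointer merge scan (alternative algorithm).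
-- ===== PORT A =====
def calculate_intersection (set1 : List Int) (set2 : List Int) : Int :=
  let set1Vals := set1.foldl (fun acc i => acc ++ [i]) []
  let intersection := set2.foldl (fun acc i =>
    if i ∈ set1Vals then (if i ∈ acc then acc else acc ++ [i]) else acc) []
  (intersection.length : Int)

-- ===== PORT B =====
-- the two-pointer while loop of Source B, as structural recursion on the two sorted lists
def pvMergeCount : List Int → List Int → Int
  | [], _ => 0
  | _ :: _, [] => 0
  | x :: xs, y :: ys =>
    if x < y then pvMergeCount xs (y :: ys)
    else if y < x then pvMergeCount (x :: xs) ys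
    else 1 + pvMergeCount xs ys

def calculate_intersection_alt (set1 : List Int) (set2 : List Int) : Int :=
  let a := PySem.List.sorted (PySem.Set.ofList set1) (fun x => x) false
  let b := PySem.List.sorted (PySem.Set.ofList set2) (fun x => x) false
  pvMergeCount a b

-- ===== PRECONDITION & SPEC =====
def Spec_calculate_intersection (set1 : List Int) (set2 : List Int) (out : Int) : Prop := out = calculate_intersection_alt set1 set2
instance (set1 : List Int) (set2 : List Int) (out : Int) : Decidable (Spec_calculate_intersection set1 set2 out) := by unfold Spec_calculate_intersection; infer_instance

-- ===== CLAIM =====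
def Claim_equal_calculate_intersection : Prop := ∀ (set1 : List Int) (set2 : List Int), Dom_calculate_intersection set1 set2 → Spec_calculate_intersection set1 set2 (calculate_intersection set1 set2)

-- ===== LEMMAS AND PROOFS =====
-- copy loop: appending one by one reproduces the list
lemma pv_copy (l acc : List Int) : l.foldl (fun a i => a ++ [i]) acc = acc ++ l := by
  induction l generalizing acc with
  | nil => simp
  | cons x xs ih => simp [List.foldl, ih, List.append_assoc]

-- invariant of A's accumulation loop: nodup, and membership characterisation
lemma pv_loop (s1 : List Int) (l acc : List Int) (hn : acc.Nodup) :
    (l.foldl (fun a i => if i ∈ s1 then (if i ∈ a then a else a ++ [i]) else a) acc).Nodup ∧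
    (∀ x, x ∈ l.foldl (fun a i => if i ∈ s1 then (if i ∈ a then a else a ++ [i]) else a) acc ↔
      x ∈ acc ∨ (x ∈ l ∧ x ∈ s1)) := by
  induction l generalizing acc with
  | nil => simpa using hn
  | cons y ys ih =>
    by_cases h1 : y ∈ s1
    · by_cases h2 : y ∈ acc
      · simp only [List.foldl, h1, if_pos, h2]
        obtain ⟨hnd, hm⟩ := ih acc hn
        refine ⟨hnd, fun x => ?_⟩
        rw [hm x]
        constructor
        · rintro (h | ⟨h, hs⟩)
          · exact Or.inl h
          · exact Or.inr ⟨List.mem_cons_of_mem _ h, hs⟩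
        · rintro (h | ⟨h, hs⟩)
          · exact Or.inl h
          · rcases List.mem_cons.mp h with rfl | h
            · exact Or.inl h2
            · exact Or.inr ⟨h, hs⟩
      · simp only [List.foldl, h1, if_pos, h2, if_neg, not_false_iff]
        have hn' : (acc ++ [y]).Nodup := by
          simp [List.nodup_append, hn]
          exact fun a ha hay => h2 (hay ▸ ha)
        obtain ⟨hnd, hm⟩ := ih (acc ++ [y]) hn'
        refine ⟨hnd, fun x => ?_⟩
        rw [hm x]
        simp only [List.mem_append, List.mem_cons]
        constructor
        · rintro ((h | hy) | ⟨h, hs⟩)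
          · exact Or.inl h
          · rcases (by simpa using hy : x = y) with rfl
            exact Or.inr ⟨Or.inl rfl, h1⟩
          · exact Or.inr ⟨Or.inr h, hs⟩
        · rintro (h | ⟨rfl | h, hs⟩)
          · exact Or.inl (Or.inl h)
          · exact Or.inl (Or.inr (by simp))
          · exact Or.inr ⟨h, hs⟩
    · simp only [List.foldl, h1, if_neg, not_false_iff]
      obtain ⟨hnd, hm⟩ := ih acc hn
      refine ⟨hnd, fun x => ?_⟩
      rw [hm x]
      constructor
      · rintro (h | ⟨h, hs⟩)
        · exact Or.inl h
        · exact Or.inr ⟨List.mem_cons_of_mem _ h, hs⟩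
      · rintro (h | ⟨h, hs⟩)
        · exact Or.inl h
        · rcases List.mem_cons.mp h with rfl | h
          · exact absurd hs h1
          · exact Or.inr ⟨h, hs⟩

-- merge scan on strictly increasing lists counts the common elements
lemma pv_merge (a b : List Int) (ha : a.Pairwise (· < ·)) (hb : b.Pairwise (· < ·)) :
    pvMergeCount a b = ((a.filter (fun x => decide (x ∈ b))).length : Int) := by
  induction a generalizing b with
  | nil => simp [pvMergeCount]
  | cons x xs iha =>
    induction b with
    | nil => simp [pvMergeCount]
    | cons y ys ihb =>
      rcases List.pairwise_cons.mp ha with ⟨hxlt, hxs⟩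
      rcases List.pairwise_cons.mp hb with ⟨hylt, hys⟩
      by_cases hxy : x < y
      · have hxnot : x ∉ y :: ys := by
          intro hmem
          rcases List.mem_cons.mp hmem with rfl | h
          · exact lt_irrefl x hxy
          · exact absurd (hylt x h) (not_lt.mpr hxy.le)
        rw [show pvMergeCount (x :: xs) (y :: ys) = pvMergeCount xs (y :: ys) by
          simp [pvMergeCount, hxy]]
        rw [show List.filter (fun z => decide (z ∈ y :: ys)) (x :: xs)
              = List.filter (fun z => decide (z ∈ y :: ys)) xs from
          List.filter_cons_of_neg (by simpa using hxnot)]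
        exact iha (y :: ys) hxs hb
      · by_cases hyx : y < x
        · have hfilt : ∀ z ∈ x :: xs, (z ∈ y :: ys) = (z ∈ ys) := by
            intro z hz
            have hzy : y < z := by
              rcases List.mem_cons.mp hz with rfl | h
              · exact hyx
              · exact lt_trans hyx (hxlt z h)
            simp [List.mem_cons]
            intro h; exact absurd h (by omega)
          rw [show pvMergeCount (x :: xs) (y :: ys) = pvMergeCount (x :: xs) ys by
            simp [pvMergeCount, hxy, hyx]]
          rw [ihb hys]
          congr 2
          apply List.filter_congr
          intro z hz
          simp only [decide_eq_decide]
          rw [hfilt z hz]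
        · have hxeqy : x = y := le_antisymm (not_lt.mp hyx) (not_lt.mp hxy)
          subst hxeqy
          rw [show pvMergeCount (x :: xs) (x :: ys) = 1 + pvMergeCount xs ys by
            simp [pvMergeCount]]
          rw [iha ys hxs hys]
          have hfilt : xs.filter (fun z => decide (z ∈ x :: ys)) = xs.filter (fun z => decide (z ∈ ys)) := by
            apply List.filter_congr
            intro z hz
            have : x < z := hxlt z hz
            simp only [decide_eq_decide, List.mem_cons]
            constructor
            · rintro (rfl | h)
              · exact absurd this (lt_irrefl z)
              · exact h
            · exact Or.inr
          rw [show List.filter (fun z => decide (z ∈ x :: ys)) (x :: xs)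
                = x :: List.filter (fun z => decide (z ∈ ys)) xs from by
            rw [List.filter_cons_of_pos (by simp), hfilt]]
          simp [List.length_cons]
          omega

-- ===== VERDICT =====
theorem calculate_intersection_spec : Claim_equal_calculate_intersection := by
  intro set1 set2 _
  unfold Spec_calculate_intersection calculate_intersection calculate_intersection_alt
  have hcopy : set1.foldl (fun a i => a ++ [i]) ([] : List Int) = set1 := by
    simpa using pv_copy set1 []
  simp only [hcopy]
  obtain ⟨hnd, hm⟩ := pv_loop set1 set2 [] List.nodup_nil
  set a := PySem.List.sorted (PySem.Set.ofList set1) (fun x => x) false with hadef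
  set b := PySem.List.sorted (PySem.Set.ofList set2) (fun x => x) false with hbdef
  have hpa : a.Pairwise (· < ·) := PySem.List.sorted_ofList_pairwise_lt set1
  have hpb : b.Pairwise (· < ·) := PySem.List.sorted_ofList_pairwise_lt set2
  rw [pv_merge a b hpa hpb]
  have hma : ∀ x : Int, x ∈ a ↔ x ∈ set1 := by
    intro x
    rw [hadef, PySem.List.mem_sorted, PySem.Set.mem_ofList]
  have hmb : ∀ x : Int, x ∈ b ↔ x ∈ set2 := by
    intro x
    rw [hbdef, PySem.List.mem_sorted, PySem.Set.mem_ofList]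
  have hperm : List.Perm
      (set2.foldl (fun acc i => if i ∈ set1 then (if i ∈ acc then acc else acc ++ [i]) else acc) [])
      (a.filter (fun x => decide (x ∈ b))) := by
    have hnf : (a.filter (fun x => decide (x ∈ b))).Nodup :=
      List.Nodup.filter _ (hpa.imp (fun h => ne_of_lt h))
    rw [List.perm_ext_iff_of_nodup hnd hnf]
    intro x
    rw [hm x]
    simp [List.mem_filter, hma, hmb, and_comm]
  simp [hperm.length_eq]
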